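-- pv_equiv track=rewrite | github.com/HarryS561/dontstarve-huijiwiki-scripts | Strings/update_strings.py | make_bucket_map_and_index
-- ===== SOURCE A (Python) =====
-- def make_bucket_map_and_index(keys: list):
--     keys = sorted(keys)
--     total = len(keys)
--     if total == 0:
--         return {}, []
--     bucket_size = (total + 99) // 100
--     if bucket_size <= 0:
--         bucket_size = 1
--
--     bucket_map = {}
--     index = []
--     for i, key in enumerate(keys):
--         bucket_index = i // bucket_size
--         if bucket_index > 99:
--             bucket_index = 99
--         bucket = f"{bucket_index:02d}"
--         bucket_map[key] = bucket
--
--     seen = set()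
--     for key in keys:
--         b = bucket_map[key]
--         if b not in seen:
--             seen.add(b)
--             index.append({"key": key, "bucket": b})
--
--     return bucket_map, index
-- ===== SOURCE B (Python) =====
-- def make_bucket_map_and_index(keys: list):
--     keys = sorted(keys)
--     if not keys:
--         return {}, []
--     bucket_size = (len(keys) + 99) // 100
--     bucket_map = {}
--     index = []
--     prev = None
--     i = 0
--     n = len(keys)
--     while i < n:
--         k = keys[i]
--         j = i + 1
--         while j < n and keys[j] == k:
--             j += 1
--         bucket = "%02d" % ((j - 1) // bucket_size)
--         bucket_map[k] = bucket
--         if bucket != prev: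
--             index.append({"key": k, "bucket": bucket})
--             prev = bucket
--         i = j
--     return bucket_map, index
-- ===== Notes on version B (the rewrite author's own statement) =====
-- stated objective: alternative
-- what changed: A makes two separate passes (enumerate every element, computing i//bucket_size with a clamp and overwriting the dict entry per duplicate, then a second full scan with a 'seen' set and per-key dict lookups to build the index); B makes a single pass over maximal runs of equal keys, writing each distinct key's bucket once from its run-end index and emitting an index entry inline whenever the label differs from the previous one, with no clamp, no overwrites, no second scan and no set.
import Mathlib
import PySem

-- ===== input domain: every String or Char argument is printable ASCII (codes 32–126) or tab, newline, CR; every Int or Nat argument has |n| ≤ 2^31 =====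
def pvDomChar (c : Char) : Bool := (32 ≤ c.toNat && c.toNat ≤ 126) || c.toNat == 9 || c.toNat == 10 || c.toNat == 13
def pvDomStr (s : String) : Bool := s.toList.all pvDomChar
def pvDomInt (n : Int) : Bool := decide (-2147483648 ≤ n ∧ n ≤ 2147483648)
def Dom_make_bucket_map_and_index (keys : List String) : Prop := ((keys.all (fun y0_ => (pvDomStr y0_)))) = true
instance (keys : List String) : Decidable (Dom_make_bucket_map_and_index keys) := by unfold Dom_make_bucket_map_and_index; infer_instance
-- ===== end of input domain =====

-- B merges A's two passes (per-element enumerate with dict overwrites + a second scan with a 'seen'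
-- set) into ONE pass over maximal runs of equal keys: one dict write per distinct key from the run-end
-- index, and an index entry whenever the label differs from the previous one; objective: alternative.


-- ===== PORT A =====
-- f"{b:02d}" / "%02d" % b (b is always ≥ 0 here) = str(b).zfill(2); PySem.Str.zfill is exact
def pvFmt (b : Int) : String := PySem.Str.zfill (PySem.Int.toStr b) 2

def make_bucket_map_and_index (keys : List String) : (List (String × String)) × (List (List (String × String))) :=
  let ks := PySem.List.sorted keys (fun x => x) false
  let total : Int := ks.length
  if total = 0 then ([], [])
  else
    let bucket_size := PySem.Int.floordiv (total + 99) 100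
    let bucket_size := if bucket_size ≤ 0 then 1 else bucket_size
    let bucket_map := (PySem.List.enumerate ks 0).foldl (fun d p =>
      let bi := PySem.Int.floordiv p.1 bucket_size
      let bi := if bi > 99 then 99 else bi
      d.insert p.2 (pvFmt bi)) PySem.Dict.empty
    -- second loop; bucket_map[key] never raises (every key of ks was inserted above), so getD is exact
    let st := ks.foldl (fun (acc : PySem.Set String × List (List (String × String))) key =>
      let b := bucket_map.getD key ""
      if PySem.Set.contains acc.1 b then acc
      else (PySem.Set.add acc.1 b, acc.2 ++ [[("key", key), ("bucket", b)]]))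
      (PySem.Set.ofList [], [])
    (bucket_map.items, st.2)

-- ===== PORT B =====
-- the outer while of Source B: one step per maximal run of equal keys; the inner while is the takeWhile
-- count; i/j are the done-counts, carried as `i`/`j`; the remaining suffix keys[i:] is the list argument
def altGo (bs : Int) : List String → Int → Option String → PySem.Dict String String → List (List (String × String)) → (List (String × String)) × (List (List (String × String)))
  | [], _, _, bm, idx => (bm.items, idx)
  | k :: rest, i, prev, bm, idx =>
    let t : Int := (rest.takeWhile (fun x => x == k)).length
    let j : Int := i + 1 + t
    let bucket := pvFmt (PySem.Int.floordiv (j - 1) bs)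
    let bm' := bm.insert k bucket
    if some bucket ≠ prev then
      altGo bs (rest.dropWhile (fun x => x == k)) j (some bucket) bm' (idx ++ [[("key", k), ("bucket", bucket)]])
    else
      altGo bs (rest.dropWhile (fun x => x == k)) j prev bm' idx
termination_by l => l.length
decreasing_by all_goals simpa using Nat.lt_succ_of_le (List.length_dropWhile_le _ _)

def make_bucket_map_and_index_alt (keys : List String) : (List (String × String)) × (List (List (String × String))) :=
  let ks := PySem.List.sorted keys (fun x => x) false
  if ks.length = 0 then ([], [])
  else
    let bucket_size := PySem.Int.floordiv ((ks.length : Int) + 99) 100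
    altGo bucket_size ks 0 none PySem.Dict.empty []

-- ===== PRECONDITION & SPEC =====
def Spec_make_bucket_map_and_index (keys : List String) (out : (List (String × String)) × (List (List (String × String)))) : Prop := out = make_bucket_map_and_index_alt keys
instance (keys : List String) (out : (List (String × String)) × (List (List (String × String)))) : Decidable (Spec_make_bucket_map_and_index keys out) := by unfold Spec_make_bucket_map_and_index; infer_instance

-- ===== CLAIM (what is proved, stated in full; the proofs are below) =====
def Claim_equal_make_bucket_map_and_index : Prop := ∀ (keys : List String), Dom_make_bucket_map_and_index keys → Spec_make_bucket_map_and_index keys (make_bucket_map_and_index keys)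

-- ===== LEMMAS AND PROOFS =====

def pvRuns (f : Int → String) (i : Int) : List String → List (String × String)
  | [] => []
  | k :: rest =>
    (k, f (i + ((rest.takeWhile (fun x => x == k)).length : Int))) ::
      pvRuns f (i + 1 + ((rest.takeWhile (fun x => x == k)).length : Int)) (rest.dropWhile (fun x => x == k))
termination_by l => l.length
decreasing_by simpa using Nat.lt_succ_of_le (List.length_dropWhile_le _ _)

def pvChg (prev : Option String) : List (String × String) → List (List (String × String))
  | [] => []
  | p :: tl => if some p.2 ≠ prev then [("key", p.1), ("bucket", p.2)] :: pvChg (some p.2) tl else pvChg prev tl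

theorem pvRuns_congr (f g : Int → String) :
    ∀ (l : List String) (i : Int), (∀ m, i ≤ m → m < i + (l.length : Int) → f m = g m) →
    pvRuns f i l = pvRuns g i l := by
  intro l i
  induction i, l using pvRuns.induct with
  | case1 i => intro h; rw [pvRuns, pvRuns]
  | case2 i k rest ih =>
    intro h
    have hd : (rest.takeWhile (fun x => x == k)).length + (rest.dropWhile (fun x => x == k)).length = rest.length := by
      rw [← List.length_append, List.takeWhile_append_dropWhile]
    rw [pvRuns, pvRuns]
    congr 1
    · rw [h _ (by omega) (by simp only [List.length_cons]; push_cast; omega)]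
    · apply ih
      intro m h1 h2
      apply h m (by omega)
      simp only [List.length_cons] at *
      push_cast at *
      omega
theorem pvRun_fold_insert (f : Int → String) (k : String) :
    ∀ (tk : List String) (i : Int) (d : PySem.Dict String String), (∀ x ∈ tk, x = k) →
    ((i, k) :: PySem.List.enumerate tk (i + 1)).foldl (fun d p => d.insert p.2 (f p.1)) d
      = d.insert k (f (i + (tk.length : Int))) := by
  intro tk
  induction tk with
  | nil => intro i d h; simp [PySem.List.enumerate_nil]
  | cons x tl ih =>
    intro i d h
    have hx : x = k := h x (by simp)
    subst hx
    rw [PySem.List.enumerate_cons, List.foldl_cons, List.foldl_cons]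
    have := ih (i + 1) (d.insert x (f i)) (fun y hy => h y (by simp [hy]))
    rw [List.foldl_cons] at this
    rw [this, PySem.Dict.insert_insert_self]
    congr 2
    simp only [List.length_cons]
    push_cast
    ring

theorem pvAmap (f : Int → String) : ∀ (l : List String) (i : Int) (d : PySem.Dict String String),
    (PySem.List.enumerate l i).foldl (fun d p => d.insert p.2 (f p.1)) d
      = (pvRuns f i l).foldl (fun d p => d.insert p.1 p.2) d := by
  intro l i
  induction i, l using pvRuns.induct with
  | case1 i => intro d; rw [pvRuns]; simp [PySem.List.enumerate_nil]
  | case2 i k rest ih =>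
    intro d
    rw [pvRuns, List.foldl_cons]
    conv_lhs => rw [← List.takeWhile_append_dropWhile (p := fun x => x == k) (l := rest)]
    rw [PySem.List.enumerate_cons, PySem.List.enumerate_append, ← List.cons_append, List.foldl_append]
    rw [pvRun_fold_insert f k _ i d (fun x hx => eq_of_beq (List.mem_takeWhile_imp (p := fun y => y == k) hx))]
    rw [← ih]
theorem pvBclosed (bs : Int) : ∀ (l : List String) (i : Int) (prev : Option String)
    (bm : PySem.Dict String String) (idx : List (List (String × String))),
    altGo bs l i prev bm idx =
      (((pvRuns (fun m => pvFmt (PySem.Int.floordiv m bs)) i l).foldl (fun d p => d.insert p.1 p.2) bm).items,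
       idx ++ pvChg prev (pvRuns (fun m => pvFmt (PySem.Int.floordiv m bs)) i l)) := by
  intro l i prev bm idx
  induction l, i, prev, bm, idx using altGo.induct (bs := bs) with
  | case1 => rw [altGo, pvRuns]; simp [pvChg]
  | case2 k rest i prev bm idx t j bucket bm' hne ih =>
    have ht : t = ((rest.takeWhile (fun x => x == k)).length : Int) := rfl
    have hj : j = i + 1 + t := rfl
    have hbk : bucket = pvFmt (PySem.Int.floordiv (j - 1) bs) := rfl
    have hbm : bm' = bm.insert k bucket := rfl
    clear_value t j bucket bm'
    subst hbm hbk hj ht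
    rw [altGo, pvRuns]
    have hrw : i + 1 + ((rest.takeWhile (fun x => x == k)).length : Int) - 1 = i + ((rest.takeWhile (fun x => x == k)).length : Int) := by omega
    rw [hrw] at ih hne ⊢
    rw [if_pos hne, ih]
    simp [pvChg, if_pos hne]
  | case3 k rest i prev bm idx t j bucket bm' hne ih =>
    have ht : t = ((rest.takeWhile (fun x => x == k)).length : Int) := rfl
    have hj : j = i + 1 + t := rfl
    have hbk : bucket = pvFmt (PySem.Int.floordiv (j - 1) bs) := rfl
    have hbm : bm' = bm.insert k bucket := rfl
    clear_value t j bucket bm'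
    subst hbm hbk hj ht
    rw [altGo, pvRuns]
    have hrw : i + 1 + ((rest.takeWhile (fun x => x == k)).length : Int) - 1 = i + ((rest.takeWhile (fun x => x == k)).length : Int) := by omega
    rw [hrw] at ih hne ⊢
    rw [if_neg hne, ih]
    simp [pvChg, if_neg hne]
theorem pvRuns_key_mem (f : Int → String) :
    ∀ (l : List String) (i : Int) (p : String × String), p ∈ pvRuns f i l → p.1 ∈ l := by
  intro l i
  induction i, l using pvRuns.induct with
  | case1 i => intro p hp; rw [pvRuns] at hp; exact absurd hp (by simp)
  | case2 i k rest ih =>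
    intro p hp
    rw [pvRuns] at hp
    rcases List.mem_cons.mp hp with h | h
    · subst h; simp
    · exact List.mem_cons_of_mem _ ((List.dropWhile_sublist _).mem (ih p h))

theorem pvDropLt (k : String) (rest : List String) (hp : (k :: rest).Pairwise (· ≤ ·)) :
    ∀ y ∈ rest.dropWhile (fun x => x == k), k < y := by
  rcases hd : rest.dropWhile (fun x => x == k) with _ | ⟨x, xs⟩
  · simp
  · intro y hy
    have hx : (x == k) = false := by
      have := List.head_dropWhile_not (p := fun x => x == k) (l := rest) (by rw [hd]; simp)
      simpa [hd] using this
    have hkx : k ≤ x := (List.pairwise_cons.mp hp).1 x ((List.dropWhile_sublist _).mem (show x ∈ rest.dropWhile (fun x => x == k) by rw [hd]; simp))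
    have hklt : k < x := lt_of_le_of_ne hkx (fun h => by simp [← h] at hx)
    have hrest : (rest.dropWhile (fun x => x == k)).Pairwise (· ≤ ·) :=
      (List.pairwise_cons.mp hp).2.sublist (List.dropWhile_sublist _)
    rw [hd] at hrest
    rcases List.mem_cons.mp hy with h | h
    · exact h ▸ hklt
    · exact lt_of_lt_of_le hklt ((List.pairwise_cons.mp hrest).1 y h)

theorem pvRuns_keys_lt (f : Int → String) :
    ∀ (l : List String) (i : Int), l.Pairwise (· ≤ ·) → ((pvRuns f i l).map Prod.fst).Pairwise (· < ·) := by
  intro l i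
  induction i, l using pvRuns.induct with
  | case1 i => intro _; simp [pvRuns]
  | case2 i k rest ih =>
    intro hp
    rw [pvRuns]
    simp only [List.map_cons]
    refine List.pairwise_cons.mpr ⟨?_, ih ((List.pairwise_cons.mp hp).2.sublist (List.dropWhile_sublist _))⟩
    intro y hy
    rcases List.mem_map.mp hy with ⟨q, hq, hq2⟩
    exact hq2 ▸ pvDropLt k rest hp q.1 (pvRuns_key_mem f _ _ q hq)

theorem pvGetD (ps : List (String × String)) (h : (ps.map Prod.fst).Pairwise (· < ·)) :
    ∀ p ∈ ps, ((ps.foldl (fun d p => d.insert p.1 p.2) PySem.Dict.empty).getD p.1 "") = p.2 := by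
  have hnd : (ps.map Prod.fst).Nodup := h.imp ne_of_lt
  have hitems : (ps.foldl (fun d p => d.insert p.1 p.2) PySem.Dict.empty).items = ps := by
    have := PySem.Dict.items_foldl_insert_fresh (l := ps) (k := Prod.fst) (v := Prod.snd)
      (d := PySem.Dict.empty) (fun a _ => PySem.Dict.contains_empty _) hnd
    simpa using this
  intro p hp
  apply PySem.Dict.getD_of_mem_items
  · rw [hitems]; exact hp
  · show (_root_.List.map Prod.fst _).Nodup
    rw [hitems]
    exact hnd
theorem pvFmt_rt : ∀ b : Fin 100, PySem.Int.ofStr? (pvFmt ((b : Nat) : Int)) = some ((b : Nat) : Int) := by decide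

theorem pvFmt_inj {x y : Int} (hx0 : 0 ≤ x) (hx : x ≤ 99) (hy0 : 0 ≤ y) (hy : y ≤ 99)
    (h : pvFmt x = pvFmt y) : x = y := by
  have hxn : x = ((x.toNat : Nat) : Int) := by omega
  have hyn : y = ((y.toNat : Nat) : Int) := by omega
  have h1 := pvFmt_rt ⟨x.toNat, by omega⟩
  have h2 := pvFmt_rt ⟨y.toNat, by omega⟩
  rw [← hxn] at h1
  rw [← hyn] at h2
  rw [h, h2] at h1
  exact (Option.some.inj h1).symm

theorem pvBounds {n : Int} (hn : 1 ≤ n) :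
    0 < PySem.Int.floordiv (n + 99) 100 ∧
    ∀ m : Int, 0 ≤ m → m < n → PySem.Int.floordiv m (PySem.Int.floordiv (n + 99) 100) ≤ 99 := by
  have h1 := PySem.Int.floordiv_mul_add_mod (n + 99) 100
  have h2 := PySem.Int.mod_nonneg (n + 99) (b := 100) (by norm_num)
  have h3 := PySem.Int.mod_lt (n + 99) (b := 100) (by norm_num)
  have hbs : 0 < PySem.Int.floordiv (n + 99) 100 := by omega
  refine ⟨hbs, fun m h0 hm => ?_⟩
  have h4 : PySem.Int.floordiv m (PySem.Int.floordiv (n + 99) 100) < 100 := by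
    rw [PySem.Int.floordiv_lt_iff_lt_mul hbs]
    omega
  omega

theorem pvFd_mono {bs a b : Int} (hbs : 0 < bs) (h : a ≤ b) :
    PySem.Int.floordiv a bs ≤ PySem.Int.floordiv b bs := by
  rw [PySem.Int.floordiv_eq_ediv_of_pos hbs, PySem.Int.floordiv_eq_ediv_of_pos hbs]
  exact Int.ediv_le_ediv hbs h

theorem pvFd_nonneg {bs a : Int} (hbs : 0 < bs) (h : 0 ≤ a) : 0 ≤ PySem.Int.floordiv a bs := by
  rw [PySem.Int.floordiv_eq_ediv_of_pos hbs]
  exact Int.ediv_nonneg h (le_of_lt hbs)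

def pvInv (bs : Int) (seen : List String) (prev : Option String) (i : Int) : Prop :=
  ∃ ms : List Int, seen = ms.map (fun m => pvFmt (PySem.Int.floordiv m bs)) ∧
    (∀ m ∈ ms, 0 ≤ m ∧ m < i) ∧
    (match prev with
     | none => ms = []
     | some p => ∃ pm, pm ∈ ms ∧ p = pvFmt (PySem.Int.floordiv pm bs) ∧
        ∀ m ∈ ms, PySem.Int.floordiv m bs ≤ PySem.Int.floordiv pm bs)

theorem pvSeenContains {bs n : Int} (hn : 1 ≤ n) (hbs : bs = PySem.Int.floordiv (n + 99) 100)
    {seen : List String} {prev : Option String} {i : Int} (hInv : pvInv bs seen prev i)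
    {m' : Int} (h0 : 0 ≤ i) (h1 : i ≤ m') (h2 : m' < n) :
    (PySem.Set.contains seen (pvFmt (PySem.Int.floordiv m' bs)) = true) ↔
      prev = some (pvFmt (PySem.Int.floordiv m' bs)) := by
  obtain ⟨hbs0, hub⟩ := pvBounds hn
  rw [← hbs] at hbs0 hub
  obtain ⟨ms, hseen, hlt, hprev⟩ := hInv
  rw [PySem.Set.contains_iff, hseen]
  constructor
  · intro hmem
    obtain ⟨m, hm, heq⟩ := List.mem_map.mp hmem
    have hb1 := hlt m hm
    have heq2 : PySem.Int.floordiv m bs = PySem.Int.floordiv m' bs :=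
      pvFmt_inj (pvFd_nonneg hbs0 hb1.1) (hub m hb1.1 (by omega))
        (pvFd_nonneg hbs0 (by omega)) (hub m' (by omega) h2) heq
    match prev, hprev with
    | some p, ⟨pm, hpm, hp, hmax⟩ =>
      have hle1 : PySem.Int.floordiv m' bs ≤ PySem.Int.floordiv pm bs := heq2 ▸ hmax m hm
      have hle2 : PySem.Int.floordiv pm bs ≤ PySem.Int.floordiv m' bs :=
        pvFd_mono hbs0 (by have := hlt pm hpm; omega)
      rw [hp, le_antisymm hle1 hle2]
    | none, hprev => rw [hprev] at hm; exact absurd hm (by simp)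
  · intro hpe
    match prev, hprev with
    | some p, ⟨pm, hpm, hp, hmax⟩ =>
      have : p = pvFmt (PySem.Int.floordiv m' bs) := Option.some.inj hpe
      rw [← this, hp]
      exact List.mem_map.mpr ⟨pm, hpm, rfl⟩
    | none, hprev => exact absurd hpe (by simp)

theorem pvRunSkip (D : PySem.Dict String String) (k : String) :
    ∀ (tk : List String) (acc : PySem.Set String × List (List (String × String))),
    (∀ x ∈ tk, x = k) → PySem.Set.contains acc.1 (D.getD k "") = true →
    tk.foldl (fun (acc : PySem.Set String × List (List (String × String))) key =>
      let b := D.getD key ""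
      if PySem.Set.contains acc.1 b then acc
      else (PySem.Set.add acc.1 b, acc.2 ++ [[("key", key), ("bucket", b)]])) acc = acc := by
  intro tk
  induction tk with
  | nil => intro acc _ _; rfl
  | cons x tl ih =>
    intro acc h hc
    have hx : x = k := h x (by simp)
    subst hx
    rw [List.foldl_cons]
    simp only [hc, if_true]
    exact ih acc (fun y hy => h y (by simp [hy])) hc
theorem pvIdx {bs n : Int} (hn : 1 ≤ n) (hbs : bs = PySem.Int.floordiv (n + 99) 100)
    (D : PySem.Dict String String) :
    ∀ (N : Nat) (l : List String), l.length ≤ N → l.Pairwise (· ≤ ·) →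
    ∀ (i : Int) (seen : PySem.Set String) (idx : List (List (String × String))) (prev : Option String),
    0 ≤ i → i + (l.length : Int) ≤ n →
    pvInv bs seen prev i →
    (∀ p ∈ pvRuns (fun m => pvFmt (PySem.Int.floordiv m bs)) i l, D.getD p.1 "" = p.2) →
    (l.foldl (fun (acc : PySem.Set String × List (List (String × String))) key =>
      let b := D.getD key ""
      if PySem.Set.contains acc.1 b then acc
      else (PySem.Set.add acc.1 b, acc.2 ++ [[("key", key), ("bucket", b)]])) (seen, idx)).2
      = idx ++ pvChg prev (pvRuns (fun m => pvFmt (PySem.Int.floordiv m bs)) i l) := by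
  intro N
  induction N with
  | zero =>
    intro l hlen _ i seen idx prev _ _ _ _
    have : l = [] := List.eq_nil_of_length_eq_zero (Nat.le_zero.mp hlen)
    subst this
    rw [pvRuns]
    simp [pvChg]
  | succ N ihN =>
    intro l hlen hp i seen idx prev h0 hsum hInv hget
    rcases l with _ | ⟨k, rest⟩
    · rw [pvRuns]; simp [pvChg]
    -- notation
    set tw := rest.takeWhile (fun x => x == k) with htw
    set dw := rest.dropWhile (fun x => x == k) with hdw
    set lab := pvFmt (PySem.Int.floordiv (i + (tw.length : Int)) bs) with hlab
    have hrun : pvRuns (fun m => pvFmt (PySem.Int.floordiv m bs)) i (k :: rest)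
        = (k, lab) :: pvRuns (fun m => pvFmt (PySem.Int.floordiv m bs)) (i + 1 + (tw.length : Int)) dw := by
      rw [pvRuns]
    have hgetk : D.getD k "" = lab := hget (k, lab) (by rw [hrun]; simp)
    have hlentd : tw.length + dw.length = rest.length := by
      rw [htw, hdw, ← List.length_append, List.takeWhile_append_dropWhile]
    have htle : (tw.length : Int) ≤ (rest.length : Int) := by exact_mod_cast by omega
    have hmlt : i + (tw.length : Int) < n := by
      simp only [List.length_cons] at hsum
      push_cast at hsum ⊢
      omega
    have hdp : dw.Pairwise (· ≤ ·) := (List.pairwise_cons.mp hp).2.sublist (List.dropWhile_sublist _)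
    have hgett : ∀ p ∈ pvRuns (fun m => pvFmt (PySem.Int.floordiv m bs)) (i + 1 + (tw.length : Int)) dw,
        D.getD p.1 "" = p.2 := fun p hp' => hget p (by rw [hrun]; exact List.mem_cons_of_mem _ hp')
    have hdlen : (dw.length : Int) + (i + 1 + (tw.length : Int)) = i + ((k :: rest).length : Int) := by
      simp only [List.length_cons]
      push_cast [← hlentd]
      ring
    have htk : ∀ x ∈ tw, x = k := fun x hx =>
      eq_of_beq (List.mem_takeWhile_imp (p := fun y => y == k) (htw ▸ hx))
    -- split the fold
    have hsplit : k :: rest = k :: (tw ++ dw) := by rw [htw, hdw, List.takeWhile_append_dropWhile]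
    rw [hrun]
    conv_lhs => rw [hsplit, List.foldl_cons, List.foldl_append]
    have hiff := pvSeenContains hn hbs hInv (m' := i + (tw.length : Int)) h0 (by omega) hmlt
    rw [← hlab] at hiff
    by_cases hc : PySem.Set.contains seen lab = true
    · -- label already seen: prev = some lab
      have hprev : prev = some lab := hiff.mp hc
      simp only [hgetk, hc, if_true]
      rw [pvRunSkip D k tw (seen, idx) htk (by rw [hgetk]; exact hc)]
      rw [ihN dw (by omega) hdp _ seen idx prev (by omega) (by omega) ?_ hgett]
      · simp only [pvChg, hprev]
        simp
      · obtain ⟨ms, hseen, hlt, hpv⟩ := hInv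
        exact ⟨ms, hseen, fun m hm => ⟨(hlt m hm).1, by have := (hlt m hm).2; omega⟩, by
          rw [hprev]
          rw [hprev] at hpv
          exact hpv⟩
    · -- new label
      have hprev : prev ≠ some lab := fun h => hc (hiff.mpr h)
      have hnmem : lab ∉ seen := fun h => hc ((PySem.Set.contains_iff _ _).mpr h)
      simp only [hgetk]
      rw [if_neg hc]
      rw [pvRunSkip D k tw _ htk (by
        rw [hgetk]
        exact (PySem.Set.contains_iff _ _).mpr ((PySem.Set.mem_add _ _ _).mpr (Or.inr rfl)))]
      have hInv' : pvInv bs (PySem.Set.add seen lab) (some lab) (i + 1 + (tw.length : Int)) := by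
        obtain ⟨ms, hseen, hlt, hpv⟩ := hInv
        refine ⟨ms ++ [i + (tw.length : Int)], ?_, ?_, ?_⟩
        · rw [PySem.Set.add_of_not_mem hnmem, hseen, List.map_append, hlab]
          rfl
        · intro m hm
          rcases List.mem_append.mp hm with h | h
          · have := hlt m h; omega
          · rw [List.mem_singleton.mp h]; omega
        · refine ⟨i + (tw.length : Int), by simp, by rw [hlab], ?_⟩
          intro m hm
          rcases List.mem_append.mp hm with h | h
          · exact pvFd_mono (hbs ▸ (pvBounds hn).1) (by have := hlt m h; omega)
          · rw [List.mem_singleton.mp h]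
      rw [ihN dw (by simp at hlen; omega) hdp _ _ _ (some lab) (by omega) (by
          simp only [List.length_cons] at hsum
          push_cast at hsum ⊢
          omega) hInv' hgett]
      simp only [pvChg, if_pos (Ne.symm hprev)]
      simp
theorem pvMain : ∀ (keys : List String),
    make_bucket_map_and_index keys = make_bucket_map_and_index_alt keys := by
  intro keys
  simp only [make_bucket_map_and_index, make_bucket_map_and_index_alt]
  by_cases hks : PySem.List.sorted keys (fun x => x) false = []
  · rw [hks]
    norm_num
  · set ks := PySem.List.sorted keys (fun x => x) false with hksdef
    have hlen : ks.length ≠ 0 := fun h => hks (List.eq_nil_of_length_eq_zero h)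
    have hn : 1 ≤ ((ks.length : Int)) := by omega
    rw [if_neg (by exact_mod_cast hlen), if_neg hlen]
    obtain ⟨hbs0, hub⟩ := pvBounds hn
    have hbsfix : (if PySem.Int.floordiv ((ks.length : Int) + 99) 100 ≤ 0 then 1
        else PySem.Int.floordiv ((ks.length : Int) + 99) 100) = PySem.Int.floordiv ((ks.length : Int) + 99) 100 := by
      rw [if_neg (by omega)]
    rw [hbsfix]
    set bs := PySem.Int.floordiv ((ks.length : Int) + 99) 100 with hbs
    have hsorted : ks.Pairwise (· ≤ ·) := by
      have := PySem.List.sorted_pairwise (xs := keys) (key := fun x => x)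
      simpa using this
    -- the map loop
    have hmap : (PySem.List.enumerate ks 0).foldl (fun d p =>
        d.insert p.2 (pvFmt (if PySem.Int.floordiv p.1 bs > 99 then 99 else PySem.Int.floordiv p.1 bs))) PySem.Dict.empty
        = (pvRuns (fun m => pvFmt (PySem.Int.floordiv m bs)) 0 ks).foldl (fun d p => d.insert p.1 p.2) PySem.Dict.empty := by
      rw [pvAmap (fun m => pvFmt (if PySem.Int.floordiv m bs > 99 then 99 else PySem.Int.floordiv m bs)) ks 0 PySem.Dict.empty]
      rw [pvRuns_congr _ (fun m => pvFmt (PySem.Int.floordiv m bs)) ks 0 (by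
        intro m hm1 hm2
        rw [if_neg]
        simp only [not_lt]
        exact hub m hm1 (by omega))]
    rw [pvBclosed]
    have hkeyslt := pvRuns_keys_lt (fun m => pvFmt (PySem.Int.floordiv m bs)) ks 0 hsorted
    have hget := pvGetD _ hkeyslt
    refine Prod.ext ?_ ?_
    · show ((PySem.List.enumerate ks 0).foldl _ PySem.Dict.empty).items = _
      rw [hmap]
    · show (ks.foldl _ (PySem.Set.ofList [], [])).2 = _
      rw [show (PySem.Set.ofList ([] : List String)) = ([] : PySem.Set String) from rfl]
      have := pvIdx hn hbs ((pvRuns (fun m => pvFmt (PySem.Int.floordiv m bs)) 0 ks).foldl (fun d p => d.insert p.1 p.2) PySem.Dict.empty)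
        ks.length ks le_rfl hsorted 0 [] [] none le_rfl (by omega) ⟨[], rfl, by simp, rfl⟩ hget
      rw [← hmap] at this
      rw [this]

-- ===== VERDICT (by name: the statement is the Claim_ definition above) =====
theorem make_bucket_map_and_index_spec : Claim_equal_make_bucket_map_and_index := by
  intro keys _
  unfold Spec_make_bucket_map_and_index
  exact pvMain keys
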